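-- pv_equiv track=rewrite | github.com/Ethara-Ai/pzprjs | games/kshitiz/play_tidepool.py | _compute_bfs_depth
-- ===== SOURCE A (Python) =====
-- def _compute_bfs_depth(shaded, rows, cols):
--     from collections import deque
--
--     dist = [[-1] * cols for _ in range(rows)]
--     q = deque()
--     for r in range(rows):
--         for c in range(cols):
--             if shaded[r][c]:
--                 continue
--             if r == 0 or r == rows - 1 or c == 0 or c == cols - 1:
--                 dist[r][c] = 0
--                 q.append((r, c))
--     while q:
--         cr, cc = q.popleft()
--         for dr, dc in [(-1, 0), (1, 0), (0, -1), (0, 1)]: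
--             nr, nc = cr + dr, cc + dc
--             if 0 <= nr < rows and 0 <= nc < cols:
--                 if not shaded[nr][nc] and dist[nr][nc] == -1:
--                     dist[nr][nc] = dist[cr][cc] + 1
--                     q.append((nr, nc))
--     return dist
-- ===== SOURCE B (Python) =====
-- def _compute_bfs_depth(shaded, rows, cols):
--     # Jacobi-style fixpoint relaxation instead of a BFS queue: start from the
--     # open border cells at 0, then repeatedly recompute a whole new grid from
--     # the previous one (an unlabelled unshaded cell adjacent to a labelled cell
--     # gets min(neighbour labels) + 1) until a full pass changes nothing.
--     def neighbors_min(dist, r, c):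
--         best = -1
--         for nr, nc in ((r - 1, c), (r + 1, c), (r, c - 1), (r, c + 1)):
--             if 0 <= nr < rows and 0 <= nc < cols:
--                 v = dist[nr][nc]
--                 if v >= 0 and (best == -1 or v < best):
--                     best = v
--         return best
--
--     dist = [[0 if (not shaded[r][c]) and (r == 0 or r == rows - 1 or c == 0 or c == cols - 1)
--              else -1 for c in range(cols)] for r in range(rows)]
--     changed = True
--     while changed:
--         changed = False
--         new = []
--         for r in range(rows):
--             row = []
--             for c in range(cols):
--                 v = dist[r][c]
--                 if v == -1 and not shaded[r][c]:
--                     m = neighbors_min(dist, r, c)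
--                     if m != -1:
--                         v = m + 1
--                         changed = True
--                 row.append(v)
--             new.append(row)
--         dist = new
--     return dist
-- ===== Notes on version B (the rewrite author's own statement) =====
-- stated objective: alternative
-- what changed: Replaces the deque-based BFS with a Jacobi-style fixpoint relaxation: seed open border cells at 0, then repeatedly rebuild the whole grid from the previous one (an unlabelled unshaded cell with a labelled neighbour gets min(neighbour labels)+1) until a full pass changes nothing; no queue or frontier is maintained.
import Mathlib
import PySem

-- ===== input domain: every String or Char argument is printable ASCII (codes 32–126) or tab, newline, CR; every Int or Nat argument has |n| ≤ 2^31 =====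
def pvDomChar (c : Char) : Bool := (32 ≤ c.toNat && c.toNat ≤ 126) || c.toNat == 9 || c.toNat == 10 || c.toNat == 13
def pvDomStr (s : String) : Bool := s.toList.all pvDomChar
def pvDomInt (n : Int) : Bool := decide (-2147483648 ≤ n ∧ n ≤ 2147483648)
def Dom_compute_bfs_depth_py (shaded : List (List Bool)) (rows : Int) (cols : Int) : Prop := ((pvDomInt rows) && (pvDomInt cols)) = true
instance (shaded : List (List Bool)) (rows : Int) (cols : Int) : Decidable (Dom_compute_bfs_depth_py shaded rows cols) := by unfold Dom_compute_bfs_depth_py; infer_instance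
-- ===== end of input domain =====

-- B replaces A's deque BFS by a Jacobi-style fixpoint relaxation (whole-grid passes repeated
-- until a pass changes nothing, no queue or frontier); objective: alternative, same results.

-- ===== PORT A =====
-- shared subscript helpers: g[r][c] reads / dist[r][c] = v writes (in range at every use site)
def pvBGet (g : List (List Bool)) (r c : Int) : Bool :=
  (PySem.List.pyGet? ((PySem.List.pyGet? g r).getD []) c).getD false

def pvIGet (g : List (List Int)) (r c : Int) : Int :=
  (PySem.List.pyGet? ((PySem.List.pyGet? g r).getD []) c).getD (-1)

def pvISet (g : List (List Int)) (r c : Int) (v : Int) : List (List Int) :=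
  g.modify r.toNat (fun row => row.set c.toNat v)

def pvDirs : List (Int × Int) := [(-1, 0), (1, 0), (0, -1), (0, 1)]

-- body of A's 'for dr, dc in [...]' loop over the state (dist, q)
def pvStepA (shaded : List (List Bool)) (rows cols cr cc : Int)
    (s : List (List Int) × List (Int × Int)) (d : Int × Int) :
    List (List Int) × List (Int × Int) :=
  let nr := cr + d.1
  let nc := cc + d.2
  if 0 ≤ nr ∧ nr < rows ∧ 0 ≤ nc ∧ nc < cols then
    if ¬ pvBGet shaded nr nc ∧ pvIGet s.1 nr nc = -1 then
      (pvISet s.1 nr nc (pvIGet s.1 cr cc + 1), s.2 ++ [(nr, nc)])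
    else s
  else s

-- A's 'while q' loop; fuel only makes it total (proved sufficient below)
def pvLoopA (shaded : List (List Bool)) (rows cols : Int) :
    Nat → List (List Int) → List (Int × Int) → List (List Int)
  | 0, dist, _ => dist
  | _ + 1, dist, [] => dist
  | f + 1, dist, (cr, cc) :: rest =>
      let s := pvDirs.foldl (pvStepA shaded rows cols cr cc) (dist, rest)
      pvLoopA shaded rows cols f s.1 s.2

-- A's initial double loop building dist and the seed queue
def pvInitA (shaded : List (List Bool)) (rows cols : Int) :
    List (List Int) × List (Int × Int) :=
  (PySem.List.pyRange 0 rows 1).foldl (fun s r =>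
    (PySem.List.pyRange 0 cols 1).foldl (fun s c =>
      if pvBGet shaded r c then s
      else if r = 0 ∨ r = rows - 1 ∨ c = 0 ∨ c = cols - 1 then
        (pvISet s.1 r c 0, s.2 ++ [(r, c)])
      else s) s)
    ((PySem.List.pyRange 0 rows 1).map (fun _ => List.replicate cols.toNat (-1)), [])

def compute_bfs_depth_py (shaded : List (List Bool)) (rows : Int) (cols : Int) : List (List Int) :=
  let s := pvInitA shaded rows cols
  pvLoopA shaded rows cols (3 * rows.toNat * cols.toNat + 3) s.1 s.2

-- ===== PORT B =====
def pvOpenBorder (shaded : List (List Bool)) (rows cols r c : Int) : Bool :=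
  (! pvBGet shaded r c) && decide (r = 0 ∨ r = rows - 1 ∨ c = 0 ∨ c = cols - 1)

-- Source B's neighbors_min: best nonnegative neighbour distance, -1 if none
def pvNbrMin (rows cols : Int) (dist : List (List Int)) (r c : Int) : Int :=
  [(r - 1, c), (r + 1, c), (r, c - 1), (r, c + 1)].foldl (fun best n =>
    if 0 ≤ n.1 ∧ n.1 < rows ∧ 0 ≤ n.2 ∧ n.2 < cols then
      if 0 ≤ pvIGet dist n.1 n.2 ∧ (best = -1 ∨ pvIGet dist n.1 n.2 < best) then
        pvIGet dist n.1 n.2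
      else best
    else best) (-1)

-- one full pass of Source B's while-body: builds the new grid and the changed flag
def pvJacPass (shaded : List (List Bool)) (rows cols : Int) (dist : List (List Int)) :
    List (List Int) × Bool :=
  (PySem.List.pyRange 0 rows 1).foldl (fun s r =>
    let t := (PySem.List.pyRange 0 cols 1).foldl (fun t c =>
      if pvIGet dist r c = -1 ∧ ¬ pvBGet shaded r c then
        if pvNbrMin rows cols dist r c ≠ -1 then
          (t.1 ++ [pvNbrMin rows cols dist r c + 1], true)
        else (t.1 ++ [pvIGet dist r c], t.2)
      else (t.1 ++ [pvIGet dist r c], t.2)) (([] : List Int), s.2)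
    (s.1 ++ [t.1], t.2)) (([] : List (List Int)), false)

-- Source B's 'while changed' loop; fuel only makes it total (proved sufficient below)
def pvJacLoop (shaded : List (List Bool)) (rows cols : Int) :
    Nat → List (List Int) → List (List Int)
  | 0, dist => dist
  | f + 1, dist =>
      let s := pvJacPass shaded rows cols dist
      if s.2 then pvJacLoop shaded rows cols f s.1 else s.1

def compute_bfs_depth_py_alt (shaded : List (List Bool)) (rows : Int) (cols : Int) :
    List (List Int) :=
  let dist := (PySem.List.pyRange 0 rows 1).map (fun r =>
    (PySem.List.pyRange 0 cols 1).map (fun c =>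
      if pvOpenBorder shaded rows cols r c then (0 : Int) else -1))
  pvJacLoop shaded rows cols (rows.toNat * cols.toNat + 2) dist

-- ===== PRECONDITION & SPEC =====
-- Pre_ excludes exactly the inputs on which Python A raises IndexError:
-- with 0 < rows and 0 < cols, shaded must cover the full rows × cols grid.
def Pre_compute_bfs_depth_py (shaded : List (List Bool)) (rows : Int) (cols : Int) : Prop :=
  0 < rows → 0 < cols →
    rows.toNat ≤ shaded.length ∧ ∀ row ∈ shaded.take rows.toNat, cols.toNat ≤ row.length

instance (shaded : List (List Bool)) (rows : Int) (cols : Int) :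
    Decidable (Pre_compute_bfs_depth_py shaded rows cols) := by
  unfold Pre_compute_bfs_depth_py; infer_instance

def pvWitness_compute_bfs_depth_py : List (List Bool) × Int × Int :=
  ([[false, true], [true, false]], 2, 2)

def Spec_compute_bfs_depth_py (shaded : List (List Bool)) (rows : Int) (cols : Int)
    (out : List (List Int)) : Prop :=
  out = compute_bfs_depth_py_alt shaded rows cols

instance (shaded : List (List Bool)) (rows : Int) (cols : Int) (out : List (List Int)) :
    Decidable (Spec_compute_bfs_depth_py shaded rows cols out) := by
  unfold Spec_compute_bfs_depth_py; infer_instance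

-- ===== CLAIM (what is proved, stated in full; the proofs are below) =====
def Claim_equal_compute_bfs_depth_py : Prop :=
  ∀ (shaded : List (List Bool)) (rows : Int) (cols : Int),
    Dom_compute_bfs_depth_py shaded rows cols →
    Pre_compute_bfs_depth_py shaded rows cols →
    Spec_compute_bfs_depth_py shaded rows cols (compute_bfs_depth_py shaded rows cols)

-- ===== LEMMAS AND PROOFS =====

def pvShape (g : List (List Int)) (R C : Nat) : Prop :=
  g.length = R ∧ ∀ row ∈ g, row.length = C

def pvInR (rows cols : Int) (p : Int × Int) : Prop :=
  0 ≤ p.1 ∧ p.1 < rows ∧ 0 ≤ p.2 ∧ p.2 < cols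

def pvCnt (g : List (List Int)) : Nat :=
  (g.map (fun row => row.countP (· == -1))).sum

def pvNbrs (p : Int × Int) : List (Int × Int) :=
  [(p.1 - 1, p.2), (p.1 + 1, p.2), (p.1, p.2 - 1), (p.1, p.2 + 1)]

-- the level-synchronous BFS that A's deque BFS is first reduced to (proof-side helper)
def pvLevStep (shaded : List (List Bool)) (rows cols lvl : Int)
    (s : List (List Int) × List (Int × Int)) (p : Int × Int) :
    List (List Int) × List (Int × Int) :=
  [(p.1 - 1, p.2), (p.1 + 1, p.2), (p.1, p.2 - 1), (p.1, p.2 + 1)].foldl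
    (fun s n =>
      if 0 ≤ n.1 ∧ n.1 < rows ∧ 0 ≤ n.2 ∧ n.2 < cols then
        if ¬ pvBGet shaded n.1 n.2 ∧ pvIGet s.1 n.1 n.2 = -1 then
          (pvISet s.1 n.1 n.2 (lvl + 1), s.2 ++ [n])
        else s
      else s) s

def pvLevLoop (shaded : List (List Bool)) (rows cols : Int) :
    Nat → List (List Int) → List (Int × Int) → Int → List (List Int)
  | 0, dist, _, _ => dist
  | _ + 1, dist, [], _ => dist
  | f + 1, dist, frontier, lvl =>
      let s := frontier.foldl (pvLevStep shaded rows cols lvl) (dist, [])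
      pvLevLoop shaded rows cols f s.1 s.2 (lvl + 1)

lemma pvIGet_eq (g : List (List Int)) (r c : Int) (h0 : 0 ≤ r) (hr : r.toNat < g.length)
    (h2 : 0 ≤ c) (hc : c.toNat < (g[r.toNat]'hr).length) :
    pvIGet g r c = (g[r.toNat]'hr)[c.toNat]'hc := by
  unfold pvIGet
  rw [PySem.List.pyGet?_of_nonneg _ h0, List.getElem?_eq_getElem hr]
  simp only [Option.getD_some]
  rw [PySem.List.pyGet?_of_nonneg _ h2, List.getElem?_eq_getElem hc]
  simp

lemma pvShape_rowlen {g : List (List Int)} {R C : Nat} (hs : pvShape g R C)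
    {j : Nat} (hj : j < g.length) : (g[j]'hj).length = C :=
  hs.2 _ (List.getElem_mem hj)

lemma pvShape_set {g : List (List Int)} {R C : Nat} (hs : pvShape g R C) (r c v : Int) :
    pvShape (pvISet g r c v) R C := by
  obtain ⟨h1, h2⟩ := hs
  refine ⟨by simpa [pvISet] using h1, ?_⟩
  intro row hrow
  rw [List.mem_iff_getElem] at hrow
  obtain ⟨j, hj, rfl⟩ := hrow
  simp only [pvISet, List.getElem_modify]
  split
  · rw [List.length_set]
    exact h2 _ (List.getElem_mem _)
  · exact h2 _ (List.getElem_mem _)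

lemma pvIGet_set_same {g : List (List Int)} {R C : Nat} {rows cols : Int}
    (hs : pvShape g R C) (hR : R = rows.toNat) (hC : C = cols.toNat)
    {p : Int × Int} (hp : pvInR rows cols p) (v : Int) :
    pvIGet (pvISet g p.1 p.2 v) p.1 p.2 = v := by
  obtain ⟨hp1, hp2, hp3, hp4⟩ := hp
  have hgl : g.length = R := hs.1
  have hgr : p.1.toNat < g.length := by omega
  have hr : p.1.toNat < (pvISet g p.1 p.2 v).length := by
    simp only [pvISet, List.length_modify]; omega
  have hrow : (pvISet g p.1 p.2 v)[p.1.toNat]'hr = (g[p.1.toNat]'hgr).set p.2.toNat v := by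
    simp [pvISet, List.getElem_modify]
  have hc : p.2.toNat < ((pvISet g p.1 p.2 v)[p.1.toNat]'hr).length := by
    rw [hrow, List.length_set, pvShape_rowlen hs]; omega
  rw [pvIGet_eq _ _ _ hp1 hr hp3 hc]
  simp only [hrow] at hc ⊢
  rw [List.getElem_set, if_pos rfl]

lemma pvIGet_set_ne {g : List (List Int)} {R C : Nat} {rows cols : Int}
    (hs : pvShape g R C) (hR : R = rows.toNat) (hC : C = cols.toNat)
    {p q : Int × Int} (hp : pvInR rows cols p) (hq : pvInR rows cols q) (hne : p ≠ q) (v : Int) :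
    pvIGet (pvISet g p.1 p.2 v) q.1 q.2 = pvIGet g q.1 q.2 := by
  obtain ⟨hp1, hp2, hp3, hp4⟩ := hp
  obtain ⟨hq1, hq2, hq3, hq4⟩ := hq
  have hgl : g.length = R := hs.1
  have hgr : q.1.toNat < g.length := by omega
  have hr : q.1.toNat < (pvISet g p.1 p.2 v).length := by
    simp only [pvISet, List.length_modify]; omega
  have hrc : q.2.toNat < (g[q.1.toNat]'hgr).length := by
    rw [pvShape_rowlen hs]; omega
  have hcases : p.1.toNat ≠ q.1.toNat ∨ (p.1.toNat = q.1.toNat ∧ p.2.toNat ≠ q.2.toNat) := by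
    by_cases h : p.1 = q.1
    · right
      refine ⟨by omega, ?_⟩
      have : p.2 ≠ q.2 := fun h2 => hne (Prod.ext h h2)
      omega
    · left; omega
  rcases hcases with h | ⟨h1, h2⟩
  · have hrow : (pvISet g p.1 p.2 v)[q.1.toNat]'hr = g[q.1.toNat]'hgr := by
      simp only [pvISet, List.getElem_modify, if_neg h]
    have hc : q.2.toNat < ((pvISet g p.1 p.2 v)[q.1.toNat]'hr).length := by rw [hrow]; exact hrc
    rw [pvIGet_eq _ _ _ hq1 hr hq3 hc, pvIGet_eq _ _ _ hq1 hgr hq3 hrc]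
    simp only [hrow]
  · have hrow : (pvISet g p.1 p.2 v)[q.1.toNat]'hr = (g[q.1.toNat]'hgr).set p.2.toNat v := by
      simp only [pvISet, List.getElem_modify, h1]
      exact if_pos trivial
    have hc : q.2.toNat < ((pvISet g p.1 p.2 v)[q.1.toNat]'hr).length := by
      rw [hrow, List.length_set]; exact hrc
    rw [pvIGet_eq _ _ _ hq1 hr hq3 hc, pvIGet_eq _ _ _ hq1 hgr hq3 hrc]
    simp only [hrow] at hc ⊢
    rw [List.getElem_set, if_neg h2]

lemma pvSumMapModify (g : List (List Int)) (f : List Int → Nat) (t : List Int → List Int) :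
    ∀ (i : Nat), (h : i < g.length) →
    ((g.modify i t).map f).sum + f (g[i]'h) = (g.map f).sum + f (t (g[i]'h)) := by
  induction g with
  | nil => intro i h; simp at h
  | cons a g ih =>
    intro i h
    cases i with
    | zero => simp [List.modify]; omega
    | succ i =>
      have h' : i < g.length := by simpa using h
      have := ih i h'
      simp only [List.modify_succ_cons, List.map_cons, List.sum_cons, List.getElem_cons_succ]
      omega

lemma pvCnt_set {g : List (List Int)} {R C : Nat} {rows cols : Int}
    (hs : pvShape g R C) (hR : R = rows.toNat) (hC : C = cols.toNat)
    {p : Int × Int} (hp : pvInR rows cols p) {v : Int}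
    (hold : pvIGet g p.1 p.2 = -1) (hv : v ≠ -1) :
    pvCnt g = pvCnt (pvISet g p.1 p.2 v) + 1 := by
  obtain ⟨hp1, hp2, hp3, hp4⟩ := hp
  have hgl : g.length = R := hs.1
  have hgr : p.1.toNat < g.length := by omega
  have hrc : p.2.toNat < (g[p.1.toNat]'hgr).length := by rw [pvShape_rowlen hs]; omega
  have hval : (g[p.1.toNat]'hgr)[p.2.toNat]'hrc = -1 := by
    rw [pvIGet_eq _ _ _ hp1 hgr hp3 hrc] at hold; exact hold
  have hsum := pvSumMapModify g (fun row => row.countP (· == -1))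
    (fun row => row.set p.2.toNat v) p.1.toNat hgr
  have hcp : ((g[p.1.toNat]'hgr).set p.2.toNat v).countP (· == -1)
      = (g[p.1.toNat]'hgr).countP (· == -1) - 1 := by
    rw [List.countP_set hrc, hval]
    simp [hv]
  have hpos : 0 < (g[p.1.toNat]'hgr).countP (· == -1) := by
    rw [List.countP_pos_iff]
    exact ⟨_, List.getElem_mem hrc, by simp [hval]⟩
  have hsum' : ((g.modify p.1.toNat (fun row => row.set p.2.toNat v)).map
        (fun row => row.countP (· == -1))).sum + (g[p.1.toNat]'hgr).countP (· == -1)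
      = (g.map (fun row => row.countP (· == -1))).sum
        + ((g[p.1.toNat]'hgr).set p.2.toNat v).countP (· == -1) := by
    simpa using hsum
  rw [show pvCnt g = (g.map (fun row => row.countP (· == -1))).sum from rfl,
      show pvCnt (pvISet g p.1 p.2 v) = ((g.modify p.1.toNat
        (fun row => row.set p.2.toNat v)).map (fun row => row.countP (· == -1))).sum from rfl]
  omega

def pvWrAt (shaded : List (List Bool)) (rows cols : Int) (w : List (List Int) → Int)
    (s : List (List Int) × List (Int × Int)) (n : Int × Int) :
    List (List Int) × List (Int × Int) :=
  if 0 ≤ n.1 ∧ n.1 < rows ∧ 0 ≤ n.2 ∧ n.2 < cols then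
    if ¬ pvBGet shaded n.1 n.2 ∧ pvIGet s.1 n.1 n.2 = -1 then
      (pvISet s.1 n.1 n.2 (w s.1), s.2 ++ [n])
    else s
  else s

lemma pvChain (shaded : List (List Bool)) (rows cols cr cc lvl : Int)
    (hcr : pvInR rows cols (cr, cc)) (hl : 0 ≤ lvl) :
    ∀ (ns : List (Int × Int)), (∀ n ∈ ns, n.1 ≠ cr ∨ n.2 ≠ cc) →
    ∀ (dist : List (List Int)) (q acc : List (Int × Int)),
      pvShape dist rows.toNat cols.toNat → pvIGet dist cr cc = lvl →
      ∃ d' e,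
        ns.foldl (pvWrAt shaded rows cols (fun g => pvIGet g cr cc + 1)) (dist, q) = (d', q ++ e) ∧
        ns.foldl (pvWrAt shaded rows cols (fun _ => lvl + 1)) (dist, acc) = (d', acc ++ e) ∧
        pvShape d' rows.toNat cols.toNat ∧
        (∀ p : Int × Int, pvInR rows cols p → pvIGet dist p.1 p.2 ≠ -1 →
          pvIGet d' p.1 p.2 = pvIGet dist p.1 p.2) ∧
        (∀ p ∈ e, pvInR rows cols p ∧ pvIGet d' p.1 p.2 = lvl + 1) ∧
        pvCnt dist = pvCnt d' + e.length := by
  intro ns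
  induction ns with
  | nil =>
    intro _ dist q acc hs hv
    exact ⟨dist, [], by simp, by simp, hs, fun p _ _ => rfl, by simp, by simp⟩
  | cons n ns ih =>
    intro hns dist q acc hs hv
    have hns' : ∀ m ∈ ns, m.1 ≠ cr ∨ m.2 ≠ cc := fun m hm => hns m (List.mem_cons_of_mem _ hm)
    have hn := hns n List.mem_cons_self
    simp only [List.foldl_cons]
    by_cases hin : 0 ≤ n.1 ∧ n.1 < rows ∧ 0 ≤ n.2 ∧ n.2 < cols
    · by_cases hdisc : ¬ pvBGet shaded n.1 n.2 ∧ pvIGet dist n.1 n.2 = -1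
      · -- discovery of n
        have hinp : pvInR rows cols n := hin
        have hne : n ≠ (cr, cc) := by
          intro h; rcases hn with h1 | h1 <;> (rw [h] at h1; simp at h1)
        have e1 : pvWrAt shaded rows cols (fun g => pvIGet g cr cc + 1) (dist, q) n
            = (pvISet dist n.1 n.2 (lvl + 1), q ++ [n]) := by
          simp only [pvWrAt, if_pos hin, if_pos hdisc, hv]
        have e2 : pvWrAt shaded rows cols (fun _ => lvl + 1) (dist, acc) n
            = (pvISet dist n.1 n.2 (lvl + 1), acc ++ [n]) := by
          simp only [pvWrAt, if_pos hin, if_pos hdisc]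
        have hs1 : pvShape (pvISet dist n.1 n.2 (lvl + 1)) rows.toNat cols.toNat :=
          pvShape_set hs _ _ _
        have hv1 : pvIGet (pvISet dist n.1 n.2 (lvl + 1)) cr cc = lvl := by
          have := pvIGet_set_ne hs rfl rfl hinp hcr hne (lvl + 1)
          simpa using this ▸ hv
        obtain ⟨d', e, hA, hB, hsh', hpres, he, hcnt⟩ :=
          ih hns' (pvISet dist n.1 n.2 (lvl + 1)) (q ++ [n]) (acc ++ [n]) hs1 hv1
        have hkeep : ∀ p : Int × Int, pvInR rows cols p → pvIGet dist p.1 p.2 ≠ -1 →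
            pvIGet (pvISet dist n.1 n.2 (lvl + 1)) p.1 p.2 = pvIGet dist p.1 p.2 := by
          intro p hp hpv
          by_cases hpn : n = p
          · exfalso; rw [hpn] at hdisc; exact hpv hdisc.2
          · exact pvIGet_set_ne hs rfl rfl hinp hp hpn _
        refine ⟨d', n :: e, ?_, ?_, hsh', ?_, ?_, ?_⟩
        · rw [e1, hA]; simp
        · rw [e2, hB]; simp
        · intro p hp hpv
          rw [hpres p hp (by rw [hkeep p hp hpv]; exact hpv), hkeep p hp hpv]
        · intro p hp
          rcases List.mem_cons.mp hp with rfl | hp'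
          · have hval : pvIGet (pvISet dist p.1 p.2 (lvl + 1)) p.1 p.2 = lvl + 1 :=
              pvIGet_set_same hs rfl rfl hinp _
            exact ⟨hinp, by rw [hpres p hinp (by rw [hval]; omega), hval]⟩
          · exact he p hp'
        · have hc1 : pvCnt dist = pvCnt (pvISet dist n.1 n.2 (lvl + 1)) + 1 :=
            pvCnt_set hs rfl rfl hinp hdisc.2 (by omega)
          rw [hc1, hcnt]; simp; omega
      · have e1 : pvWrAt shaded rows cols (fun g => pvIGet g cr cc + 1) (dist, q) n = (dist, q) := by
          simp only [pvWrAt, if_pos hin, if_neg hdisc]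
        have e2 : pvWrAt shaded rows cols (fun _ => lvl + 1) (dist, acc) n = (dist, acc) := by
          simp only [pvWrAt, if_pos hin, if_neg hdisc]
        rw [e1, e2]; exact ih hns' dist q acc hs hv
    · have e1 : pvWrAt shaded rows cols (fun g => pvIGet g cr cc + 1) (dist, q) n = (dist, q) := by
        simp only [pvWrAt, if_neg hin]
      have e2 : pvWrAt shaded rows cols (fun _ => lvl + 1) (dist, acc) n = (dist, acc) := by
        simp only [pvWrAt, if_neg hin]
      rw [e1, e2]; exact ih hns' dist q acc hs hv

lemma pvNbrsMap (cr cc : Int) :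
    [(cr - 1, cc), (cr + 1, cc), (cr, cc - 1), (cr, cc + 1)]
      = pvDirs.map (fun d => (cr + d.1, cc + d.2)) := by
  simp [pvDirs, Prod.ext_iff]
  omega

lemma pvStepA_eq (shaded : List (List Bool)) (rows cols cr cc : Int)
    (s : List (List Int) × List (Int × Int)) :
    pvDirs.foldl (pvStepA shaded rows cols cr cc) s =
    [(cr - 1, cc), (cr + 1, cc), (cr, cc - 1), (cr, cc + 1)].foldl
      (pvWrAt shaded rows cols (fun g => pvIGet g cr cc + 1)) s := by
  rw [pvNbrsMap, List.foldl_map]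
  rfl

lemma pvLevStep_eq (shaded : List (List Bool)) (rows cols lvl : Int)
    (s : List (List Int) × List (Int × Int)) (p : Int × Int) :
    pvLevStep shaded rows cols lvl s p =
    [(p.1 - 1, p.2), (p.1 + 1, p.2), (p.1, p.2 - 1), (p.1, p.2 + 1)].foldl
      (pvWrAt shaded rows cols (fun _ => lvl + 1)) s := rfl

lemma pvCell (shaded : List (List Bool)) (rows cols : Int) (c : Int × Int) (lvl : Int)
    (hcr : pvInR rows cols c) (hl : 0 ≤ lvl)
    (dist : List (List Int)) (q acc : List (Int × Int))
    (hs : pvShape dist rows.toNat cols.toNat) (hv : pvIGet dist c.1 c.2 = lvl) :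
    ∃ d' e,
      pvDirs.foldl (pvStepA shaded rows cols c.1 c.2) (dist, q) = (d', q ++ e) ∧
      pvLevStep shaded rows cols lvl (dist, acc) c = (d', acc ++ e) ∧
      pvShape d' rows.toNat cols.toNat ∧
      (∀ p : Int × Int, pvInR rows cols p → pvIGet dist p.1 p.2 ≠ -1 →
        pvIGet d' p.1 p.2 = pvIGet dist p.1 p.2) ∧
      (∀ p ∈ e, pvInR rows cols p ∧ pvIGet d' p.1 p.2 = lvl + 1) ∧
      pvCnt dist = pvCnt d' + e.length := by
  have hns : ∀ n ∈ [(c.1 - 1, c.2), (c.1 + 1, c.2), (c.1, c.2 - 1), (c.1, c.2 + 1)],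
      (n : Int × Int).1 ≠ c.1 ∨ n.2 ≠ c.2 := by
    intro n hn
    fin_cases hn <;> simp <;> omega
  obtain ⟨d', e, hA, hB, h3, h4, h5, h6⟩ :=
    pvChain shaded rows cols c.1 c.2 lvl hcr hl _ hns dist q acc hs hv
  exact ⟨d', e, by rw [pvStepA_eq]; exact hA, by rw [pvLevStep_eq]; exact hB, h3, h4, h5, h6⟩

lemma pvLevLoop_cons (shaded : List (List Bool)) (rows cols : Int) (f : Nat)
    (dist : List (List Int)) (c : Int × Int) (fr : List (Int × Int)) (lvl : Int) :
    pvLevLoop shaded rows cols (f + 1) dist (c :: fr) lvl =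
      (let s := (c :: fr).foldl (pvLevStep shaded rows cols lvl) (dist, [])
       pvLevLoop shaded rows cols f s.1 s.2 (lvl + 1)) := rfl

lemma pvSim (shaded : List (List Bool)) (rows cols : Int) :
    ∀ (N : Nat) (dist : List (List Int)) (rem nxt : List (Int × Int)) (lvl : Int) (f g : Nat),
      2 * pvCnt dist + (rem ++ nxt).length ≤ N →
      pvShape dist rows.toNat cols.toNat → 0 ≤ lvl →
      (∀ p ∈ rem, pvInR rows cols p ∧ pvIGet dist p.1 p.2 = lvl) →
      (∀ p ∈ nxt, pvInR rows cols p ∧ pvIGet dist p.1 p.2 = lvl + 1) →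
      N < f → N < g →
      pvLoopA shaded rows cols f dist (rem ++ nxt) =
        (let s := rem.foldl (pvLevStep shaded rows cols lvl) (dist, nxt)
         pvLevLoop shaded rows cols g s.1 s.2 (lvl + 1)) := by
  intro N
  induction N with
  | zero =>
    intro dist rem nxt lvl f g hmu hs hl hrem hnxt hf hg
    have hre : rem = [] := by cases rem <;> simp_all
    have hnx : nxt = [] := by cases nxt <;> simp_all
    subst hre; subst hnx
    cases f with
    | zero => omega
    | succ f =>
      cases g with
      | zero => omega
      | succ g => simp [pvLoopA, pvLevLoop]
  | succ N ih =>
    intro dist rem nxt lvl f g hmu hs hl hrem hnxt hf hg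
    cases f with
    | zero => omega
    | succ f =>
    cases g with
    | zero => omega
    | succ g =>
    cases rem with
    | nil =>
      cases nxt with
      | nil => simp [pvLoopA, pvLevLoop]
      | cons c nxt' =>
        obtain ⟨hcInR, hcval⟩ := hnxt c List.mem_cons_self
        obtain ⟨d', e, hA, hB, hsh', hpres, he, hcnt⟩ :=
          pvCell shaded rows cols c (lvl + 1) hcInR (by omega) dist nxt' [] hs hcval
        obtain ⟨cr, cc⟩ := c
        have lhs1 : pvLoopA shaded rows cols (f + 1) dist ([] ++ (cr, cc) :: nxt')
            = pvLoopA shaded rows cols f d' (nxt' ++ e) := by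
          simp only [List.nil_append, pvLoopA, hA]
        have ihe := ih d' nxt' e (lvl + 1) f g
          (by simp at hmu ⊢; omega)
          hsh' (by omega)
          (fun p hp => ⟨(hnxt p (List.mem_cons_of_mem _ hp)).1,
            by rw [hpres p (hnxt p (List.mem_cons_of_mem _ hp)).1
                (by rw [(hnxt p (List.mem_cons_of_mem _ hp)).2]; omega)]
               exact (hnxt p (List.mem_cons_of_mem _ hp)).2⟩)
          (fun p hp => (he p hp))
          (by omega) (by omega)
        rw [lhs1, ihe]
        simp only [List.foldl_nil]
        rw [pvLevLoop_cons]
        simp only [List.foldl_cons]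
        rw [show pvLevStep shaded rows cols (lvl + 1) (dist, []) (cr, cc) = (d', e) by
          rw [hB]; simp]
    | cons c rem' =>
      obtain ⟨hcInR, hcval⟩ := hrem c List.mem_cons_self
      obtain ⟨d', e, hA, hB, hsh', hpres, he, hcnt⟩ :=
        pvCell shaded rows cols c lvl hcInR hl dist (rem' ++ nxt) nxt hs hcval
      obtain ⟨cr, cc⟩ := c
      have lhs1 : pvLoopA shaded rows cols (f + 1) dist ((cr, cc) :: rem' ++ nxt)
          = pvLoopA shaded rows cols f d' (rem' ++ (nxt ++ e)) := by
        simp only [List.cons_append, pvLoopA, hA]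
        rw [List.append_assoc]
      have ihe := ih d' rem' (nxt ++ e) lvl f (g + 1)
        (by simp at hmu ⊢; omega)
        hsh' hl
        (fun p hp => ⟨(hrem p (List.mem_cons_of_mem _ hp)).1,
          by rw [hpres p (hrem p (List.mem_cons_of_mem _ hp)).1
              (by rw [(hrem p (List.mem_cons_of_mem _ hp)).2]; omega)]
             exact (hrem p (List.mem_cons_of_mem _ hp)).2⟩)
        (fun p hp => by
          rcases List.mem_append.mp hp with hp' | hp'
          · exact ⟨(hnxt p hp').1,
              by rw [hpres p (hnxt p hp').1 (by rw [(hnxt p hp').2]; omega)]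
                 exact (hnxt p hp').2⟩
          · exact he p hp')
        (by omega) (by omega)
      rw [lhs1, ihe]
      simp only [List.foldl_cons]
      rw [show pvLevStep shaded rows cols lvl (dist, nxt) (cr, cc) = (d', nxt ++ e) from hB]

def pvDStep (shaded : List (List Bool)) (rows cols r : Int)
    (g : List (List Int)) (c : Int) : List (List Int) :=
  if pvBGet shaded r c then g
  else if r = 0 ∨ r = rows - 1 ∨ c = 0 ∨ c = cols - 1 then pvISet g r c 0
  else g

def pvQStep (shaded : List (List Bool)) (rows cols r : Int)
    (q : List (Int × Int)) (c : Int) : List (Int × Int) :=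
  if pvBGet shaded r c then q
  else if r = 0 ∨ r = rows - 1 ∨ c = 0 ∨ c = cols - 1 then q ++ [(r, c)]
  else q

def pvRStep (shaded : List (List Bool)) (rows cols r : Int)
    (row : List Int) (c : Int) : List Int :=
  if pvOpenBorder shaded rows cols r c then row.set c.toNat 0 else row

lemma pvModifyModify (t h : List Int → List Int) :
    ∀ (g : List (List Int)) (i : Nat),
      (g.modify i t).modify i h = g.modify i (fun row => h (t row)) := by
  intro g
  induction g with
  | nil => intro i; simp
  | cons a g ih =>
    intro i
    cases i with
    | zero => simp [List.modify]
    | succ i => simp [List.modify_succ_cons, ih i]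

lemma pvDStep_modify (shaded : List (List Bool)) (rows cols r : Int)
    (g : List (List Int)) (c : Int) :
    pvDStep shaded rows cols r g c = g.modify r.toNat (fun row => pvRStep shaded rows cols r row c) := by
  unfold pvDStep pvRStep pvOpenBorder pvISet
  split_ifs with h1 h2 h3 h3 <;> simp_all
  · exact (List.modify_id _ _).symm
  · exact (List.modify_id _ _).symm

lemma pvDInner (shaded : List (List Bool)) (rows cols r : Int) :
    ∀ (cs : List Int) (g : List (List Int)),
      cs.foldl (pvDStep shaded rows cols r) g
        = g.modify r.toNat (fun row => cs.foldl (pvRStep shaded rows cols r) row) := by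
  intro cs
  induction cs with
  | nil => intro g; exact (List.modify_id _ _).symm
  | cons c cs ih =>
    intro g
    simp only [List.foldl_cons]
    rw [ih, pvDStep_modify, pvModifyModify]

lemma pvFoldSetLen (P : Nat → Bool) (n : Nat) : ∀ (row : List Int),
    ((List.range n).foldl (fun row k => if P k then row.set k (0 : Int) else row) row).length
      = row.length := by
  induction n with
  | zero => intro row; simp
  | succ n ih =>
    intro row
    rw [List.range_succ, List.foldl_append]
    simp only [List.foldl_cons, List.foldl_nil]
    split <;> simp [ih]

lemma pvFoldSetGet (P : Nat → Bool) (n : Nat) : ∀ (row : List Int) (j : Nat), j < row.length →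
    ((List.range n).foldl (fun row k => if P k then row.set k (0 : Int) else row) row)[j]?
      = if j < n ∧ P j then some 0 else row[j]? := by
  induction n with
  | zero => intro row j hj; simp
  | succ n ih =>
    intro row j hj
    rw [List.range_succ, List.foldl_append]
    simp only [List.foldl_cons, List.foldl_nil]
    by_cases hp : P n
    · rw [if_pos hp, List.getElem?_set]
      rw [pvFoldSetLen, ih _ _ hj]
      by_cases hnj : n = j
      · subst hnj
        simp [hj, hp]
      · rw [if_neg hnj]
        by_cases h2 : j < n ∧ P j
        · simp [h2, show j < n + 1 ∧ P j from ⟨by omega, h2.2⟩]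
        · rw [if_neg h2, if_neg (by rintro ⟨h3, h4⟩; exact h2 ⟨by omega, h4⟩)]
    · rw [if_neg hp, ih _ _ hj]
      congr 1
      simp only [eq_iff_iff]
      constructor
      · rintro ⟨h1, h2⟩; exact ⟨by omega, h2⟩
      · rintro ⟨h1, h2⟩
        refine ⟨?_, h2⟩
        rcases Nat.lt_succ_iff_lt_or_eq.mp h1 with h | h
        · exact h
        · subst h; exact absurd h2 (by simpa using hp)

lemma pvFoldModLen (t : Nat → List Int → List Int) (n : Nat) : ∀ (g : List (List Int)),
    ((List.range n).foldl (fun g i => g.modify i (t i)) g).length = g.length := by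
  induction n with
  | zero => intro g; simp
  | succ n ih =>
    intro g
    rw [List.range_succ, List.foldl_append]
    simp [ih]

lemma pvFoldModGet (t : Nat → List Int → List Int) (n : Nat) :
    ∀ (g : List (List Int)) (j : Nat) (hj : j < g.length),
    ((List.range n).foldl (fun g i => g.modify i (t i)) g)[j]?
      = if j < n then some (t j (g[j]'hj)) else g[j]? := by
  induction n with
  | zero => intro g j hj; simp
  | succ n ih =>
    intro g j hj
    rw [List.range_succ, List.foldl_append]
    simp only [List.foldl_cons, List.foldl_nil]
    rw [List.getElem?_modify, ih _ _ hj]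
    by_cases hnj : n = j
    · subst hnj
      simp [hj, List.getElem?_eq_getElem hj]
    · by_cases h2 : j < n
      · simp [h2, show j < n + 1 from by omega, hnj]
      · have h3 : ¬ j < n + 1 := by omega
        simp [h2, h3, List.getElem?_eq_getElem hj, hnj]

lemma pvInitInnerPair (shaded : List (List Bool)) (rows cols r : Int) :
    ∀ (cs : List Int) (s : List (List Int) × List (Int × Int)),
      cs.foldl (fun s c =>
        if pvBGet shaded r c then s
        else if r = 0 ∨ r = rows - 1 ∨ c = 0 ∨ c = cols - 1 then
          (pvISet s.1 r c 0, s.2 ++ [(r, c)])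
        else s) s
      = (cs.foldl (pvDStep shaded rows cols r) s.1, cs.foldl (pvQStep shaded rows cols r) s.2) := by
  intro cs
  induction cs with
  | nil => intro s; rfl
  | cons c cs ih =>
    intro s
    simp only [List.foldl_cons]
    rw [show (if pvBGet shaded r c then s
        else if r = 0 ∨ r = rows - 1 ∨ c = 0 ∨ c = cols - 1 then
          (pvISet s.1 r c 0, s.2 ++ [(r, c)])
        else s)
      = (pvDStep shaded rows cols r s.1 c, pvQStep shaded rows cols r s.2 c) from by
        simp only [pvDStep, pvQStep]; split_ifs <;> rfl]
    exact ih _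

lemma pvInitPair (shaded : List (List Bool)) (rows cols : Int) :
    ∀ (rs : List Int) (s : List (List Int) × List (Int × Int)),
      rs.foldl (fun s r =>
        (PySem.List.pyRange 0 cols 1).foldl (fun s c =>
          if pvBGet shaded r c then s
          else if r = 0 ∨ r = rows - 1 ∨ c = 0 ∨ c = cols - 1 then
            (pvISet s.1 r c 0, s.2 ++ [(r, c)])
          else s) s) s
      = (rs.foldl (fun g r => (PySem.List.pyRange 0 cols 1).foldl (pvDStep shaded rows cols r) g) s.1,
         rs.foldl (fun q r => (PySem.List.pyRange 0 cols 1).foldl (pvQStep shaded rows cols r) q) s.2) := by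
  intro rs
  induction rs with
  | nil => intro s; rfl
  | cons r rs ih =>
    intro s
    simp only [List.foldl_cons]
    rw [pvInitInnerPair]
    exact ih _

lemma pvQ_eq (shaded : List (List Bool)) (rows cols : Int) :
    (PySem.List.pyRange 0 rows 1).foldl
        (fun q r => (PySem.List.pyRange 0 cols 1).foldl (pvQStep shaded rows cols r) q) []
      = (PySem.List.pyRange 0 rows 1).flatMap (fun r =>
          ((PySem.List.pyRange 0 cols 1).filter (fun c => pvOpenBorder shaded rows cols r c)).map
            (fun c => (r, c))) := by
  have hq : ∀ (r : Int) (q : List (Int × Int)),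
      (PySem.List.pyRange 0 cols 1).foldl (pvQStep shaded rows cols r) q
        = q ++ ((PySem.List.pyRange 0 cols 1).filter
            (fun c => pvOpenBorder shaded rows cols r c)).map (fun c => (r, c)) := by
    intro r q
    rw [show pvQStep shaded rows cols r
        = (fun q c => if pvOpenBorder shaded rows cols r c then q ++ [(r, c)] else q) from by
      funext q c
      simp only [pvQStep, pvOpenBorder]
      split_ifs <;> simp_all]
    exact PySem.List.foldl_append_if _ _ _ _
  have h1 := PySem.List.foldl_congr_mem
    (l := PySem.List.pyRange 0 rows 1)
    (f := fun q r => (PySem.List.pyRange 0 cols 1).foldl (pvQStep shaded rows cols r) q)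
    (g := fun q r => q ++ ((PySem.List.pyRange 0 cols 1).filter
        (fun c => pvOpenBorder shaded rows cols r c)).map (fun c => (r, c)))
    (init := []) (by intro acc x _; exact hq x acc)
  rw [h1]
  exact PySem.List.foldl_append_eq_flatMap _ _ _

lemma pvRange_natify (n : Int) :
    PySem.List.pyRange 0 n 1 = (List.range n.toNat).map (fun (k : Nat) => (k : Int)) :=
  PySem.List.pyRange_zero n

lemma pvRow_eq (shaded : List (List Bool)) (rows cols r : Int) :
    (PySem.List.pyRange 0 cols 1).foldl (pvRStep shaded rows cols r)
        (List.replicate cols.toNat (-1))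
      = (PySem.List.pyRange 0 cols 1).map
          (fun c => if pvOpenBorder shaded rows cols r c then (0 : Int) else -1) := by
  rw [pvRange_natify, List.foldl_map, List.map_map]
  have hfold := pvFoldSetGet (fun k => pvOpenBorder shaded rows cols r (k : Int)) cols.toNat
  have hlen := pvFoldSetLen (fun k => pvOpenBorder shaded rows cols r (k : Int)) cols.toNat
  have hbody : (fun (row : List Int) (k : Nat) => pvRStep shaded rows cols r row (k : Int))
      = (fun (row : List Int) (k : Nat) => if pvOpenBorder shaded rows cols r (k : Int) then row.set k (0 : Int) else row) := by
    funext row k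
    simp [pvRStep]
  rw [hbody]
  apply List.ext_getElem?
  intro k
  by_cases hk : k < cols.toNat
  · rw [hfold _ _ (by simpa using hk)]
    rw [List.getElem?_map, List.getElem?_range hk]
    by_cases hP : pvOpenBorder shaded rows cols r (k : Int)
    · simp [hP, hk]
    · simp [hP, hk, List.getElem?_replicate]
  · rw [List.getElem?_eq_none (by rw [pvFoldSetLen]; simp; omega),
        List.getElem?_eq_none (by simp; omega)]

lemma pvD_eq (shaded : List (List Bool)) (rows cols : Int) :
    (PySem.List.pyRange 0 rows 1).foldl
        (fun g r => (PySem.List.pyRange 0 cols 1).foldl (pvDStep shaded rows cols r) g)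
        ((PySem.List.pyRange 0 rows 1).map (fun _ => List.replicate cols.toNat (-1)))
      = (PySem.List.pyRange 0 rows 1).map (fun r =>
          (PySem.List.pyRange 0 cols 1).map
            (fun c => if pvOpenBorder shaded rows cols r c then (0 : Int) else -1)) := by
  have h1 := PySem.List.foldl_congr_mem
      (l := PySem.List.pyRange 0 rows 1)
      (f := fun g r => (PySem.List.pyRange 0 cols 1).foldl (pvDStep shaded rows cols r) g)
      (g := fun g r => g.modify r.toNat
        (fun row => (PySem.List.pyRange 0 cols 1).foldl (pvRStep shaded rows cols r) row))
      (init := (PySem.List.pyRange 0 rows 1).map (fun _ => List.replicate cols.toNat (-1)))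
      (by intro acc x _; exact pvDInner shaded rows cols x _ acc)
  rw [h1, pvRange_natify rows, List.foldl_map]
  simp only [Int.toNat_natCast]
  apply List.ext_getElem?
  intro j
  by_cases hj : j < rows.toNat
  · have hjlen : j < (((List.range rows.toNat).map (fun (k : Nat) => (k : Int))).map
        (fun _ => List.replicate cols.toNat (-1))).length := by simp [hj]
    have hmod := pvFoldModGet
      (fun k row => (PySem.List.pyRange 0 cols 1).foldl (pvRStep shaded rows cols (k : Int)) row)
      rows.toNat _ j hjlen
    rw [hmod, if_pos hj]
    have hinit : (((List.range rows.toNat).map (fun (k : Nat) => (k : Int))).map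
        (fun _ => List.replicate cols.toNat (-1)))[j]'hjlen = List.replicate cols.toNat (-1) := by
      simp
    rw [hinit, pvRow_eq]
    rw [List.getElem?_map, List.getElem?_map, List.getElem?_range hj]
    rfl
  · rw [List.getElem?_eq_none (by rw [pvFoldModLen]; simp; omega),
        List.getElem?_eq_none (by simp; omega)]

lemma pvInitEq (shaded : List (List Bool)) (rows cols : Int) :
    pvInitA shaded rows cols =
      ((PySem.List.pyRange 0 rows 1).map (fun r =>
        (PySem.List.pyRange 0 cols 1).map
          (fun c => if pvOpenBorder shaded rows cols r c then (0 : Int) else -1)),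
       (PySem.List.pyRange 0 rows 1).flatMap (fun r =>
        ((PySem.List.pyRange 0 cols 1).filter (fun c => pvOpenBorder shaded rows cols r c)).map
          (fun c => (r, c)))) := by
  unfold pvInitA
  rw [pvInitPair]
  exact Prod.ext (pvD_eq shaded rows cols) (pvQ_eq shaded rows cols)

lemma pvIGet_mapGrid (rows cols : Int) (f : Int → Int → Int) {p : Int × Int}
    (hp : pvInR rows cols p) :
    pvIGet ((PySem.List.pyRange 0 rows 1).map (fun r =>
        (PySem.List.pyRange 0 cols 1).map (fun c => f r c))) p.1 p.2 = f p.1 p.2 := by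
  obtain ⟨h1, h2, h3, h4⟩ := hp
  unfold pvIGet
  rw [PySem.List.pyGet?_of_nonneg _ h1, pvRange_natify rows]
  rw [List.getElem?_map, List.getElem?_map, List.getElem?_range (by omega : p.1.toNat < rows.toNat)]
  simp only [Option.map_some, Option.getD_some]
  rw [Int.toNat_of_nonneg h1]
  rw [PySem.List.pyGet?_of_nonneg _ h3, pvRange_natify cols]
  rw [List.getElem?_map, List.getElem?_map, List.getElem?_range (by omega : p.2.toNat < cols.toNat)]
  simp [Int.toNat_of_nonneg h3]

lemma pvShape_mapGrid (rows cols : Int) (f : Int → Int → Int) :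
    pvShape ((PySem.List.pyRange 0 rows 1).map (fun r =>
        (PySem.List.pyRange 0 cols 1).map (fun c => f r c))) rows.toNat cols.toNat := by
  constructor
  · rw [pvRange_natify rows]; simp
  · intro row hrow
    rw [List.mem_map] at hrow
    obtain ⟨r, _, rfl⟩ := hrow
    rw [pvRange_natify cols]; simp

lemma pvCnt_le {g : List (List Int)} {R C : Nat} (hs : pvShape g R C) : pvCnt g ≤ R * C := by
  obtain ⟨h1, h2⟩ := hs
  have := List.sum_le_card_nsmul (g.map (fun row => row.countP (· == -1))) C (by
    intro x hx
    rw [List.mem_map] at hx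
    obtain ⟨row, hrow, rfl⟩ := hx
    calc row.countP (· == -1) ≤ row.length := List.countP_le_length
    _ = C := h2 row hrow)
  simpa [pvCnt, h1, Nat.smul_one_eq_cast] using this

lemma pvFrontLen (shaded : List (List Bool)) (rows cols : Int) :
    ((PySem.List.pyRange 0 rows 1).flatMap (fun r =>
      ((PySem.List.pyRange 0 cols 1).filter (fun c => pvOpenBorder shaded rows cols r c)).map
        (fun c => (r, c)))).length ≤ rows.toNat * cols.toNat := by
  rw [List.length_flatMap]
  have := List.sum_le_card_nsmul
    ((PySem.List.pyRange 0 rows 1).map (fun r =>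
      (((PySem.List.pyRange 0 cols 1).filter (fun c => pvOpenBorder shaded rows cols r c)).map
        (fun c => (r, c))).length)) cols.toNat (by
      intro x hx
      rw [List.mem_map] at hx
      obtain ⟨r, _, rfl⟩ := hx
      rw [List.length_map]
      calc _ ≤ (PySem.List.pyRange 0 cols 1).length := List.length_filter_le _ _
        _ = cols.toNat := by rw [pvRange_natify cols]; simp)
  calc _ ≤ _ := this
    _ ≤ rows.toNat * cols.toNat := by
        rw [List.length_map]
        rw [show (PySem.List.pyRange 0 rows 1).length = rows.toNat from by rw [pvRange_natify rows]; simp]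
        simp [Nat.smul_one_eq_cast]

lemma pvFrontMem (shaded : List (List Bool)) (rows cols : Int) {p : Int × Int}
    (hp : p ∈ (PySem.List.pyRange 0 rows 1).flatMap (fun r =>
      ((PySem.List.pyRange 0 cols 1).filter (fun c => pvOpenBorder shaded rows cols r c)).map
        (fun c => (r, c)))) :
    pvInR rows cols p ∧ pvOpenBorder shaded rows cols p.1 p.2 = true := by
  rw [List.mem_flatMap] at hp
  obtain ⟨r, hr, hp2⟩ := hp
  rw [List.mem_map] at hp2
  obtain ⟨c, hc, rfl⟩ := hp2
  rw [List.mem_filter] at hc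
  obtain ⟨hc1, hc2⟩ := hc
  rw [PySem.List.mem_pyRange_one] at hr
  rw [PySem.List.mem_pyRange_one] at hc1
  exact ⟨⟨hr.1, hr.2, hc1.1, hc1.2⟩, hc2⟩

lemma pvFrontMem_rev (shaded : List (List Bool)) (rows cols : Int) {p : Int × Int}
    (h1 : pvInR rows cols p) (h2 : pvOpenBorder shaded rows cols p.1 p.2 = true) :
    p ∈ (PySem.List.pyRange 0 rows 1).flatMap (fun r =>
      ((PySem.List.pyRange 0 cols 1).filter (fun c => pvOpenBorder shaded rows cols r c)).map
        (fun c => (r, c))) := by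
  obtain ⟨ha, hb, hc, hd⟩ := h1
  rw [List.mem_flatMap]
  refine ⟨p.1, by rw [PySem.List.mem_pyRange_one]; exact ⟨ha, hb⟩, ?_⟩
  rw [List.mem_map]
  exact ⟨p.2, by rw [List.mem_filter, PySem.List.mem_pyRange_one]; exact ⟨⟨hc, hd⟩, h2⟩, rfl⟩

-- ===== level-BFS ↔ Jacobi-relaxation equivalence =====

lemma pvNbrs_symm (p q : Int × Int) : p ∈ pvNbrs q ↔ q ∈ pvNbrs p := by
  simp [pvNbrs, Prod.ext_iff]
  omega

-- condition under which the write-fold discovers p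
def pvCndW (shaded : List (List Bool)) (rows cols : Int) (G : List (List Int))
    (ns : List (Int × Int)) (p : Int × Int) : Prop :=
  pvInR rows cols p ∧ pvBGet shaded p.1 p.2 = false ∧ pvIGet G p.1 p.2 = -1 ∧ p ∈ ns

lemma pvWrFold (shaded : List (List Bool)) (rows cols lvl : Int) (hl : 0 ≤ lvl) :
    ∀ (ns : List (Int × Int)) (G : List (List Int)) (q0 : List (Int × Int)),
      pvShape G rows.toNat cols.toNat →
      ∃ G' e, ns.foldl (pvWrAt shaded rows cols (fun _ => lvl + 1)) (G, q0) = (G', q0 ++ e) ∧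
        pvShape G' rows.toNat cols.toNat ∧
        (∀ p : Int × Int, pvCndW shaded rows cols G ns p → pvIGet G' p.1 p.2 = lvl + 1) ∧
        (∀ p : Int × Int, pvInR rows cols p → ¬ pvCndW shaded rows cols G ns p →
          pvIGet G' p.1 p.2 = pvIGet G p.1 p.2) ∧
        (∀ p : Int × Int, p ∈ e ↔ pvCndW shaded rows cols G ns p) ∧
        pvCnt G = pvCnt G' + e.length := by
  intro ns
  induction ns with
  | nil =>
    intro G q0 hs
    refine ⟨G, [], by simp, hs, ?_, fun _ _ _ => rfl, ?_, by simp⟩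
    · rintro p ⟨_, _, _, hmem⟩
      simp at hmem
    · intro p
      simp [pvCndW]
  | cons n ns ih =>
    intro G q0 hs
    simp only [List.foldl_cons]
    by_cases hin : 0 ≤ n.1 ∧ n.1 < rows ∧ 0 ≤ n.2 ∧ n.2 < cols
    · by_cases hdisc : ¬ pvBGet shaded n.1 n.2 ∧ pvIGet G n.1 n.2 = -1
      · -- n is discovered and written
        have hinp : pvInR rows cols n := hin
        have e2 : pvWrAt shaded rows cols (fun _ => lvl + 1) (G, q0) n
            = (pvISet G n.1 n.2 (lvl + 1), q0 ++ [n]) := by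
          simp only [pvWrAt, if_pos hin, if_pos hdisc]
        set G1 := pvISet G n.1 n.2 (lvl + 1) with hG1
        have hs1 : pvShape G1 rows.toNat cols.toNat := pvShape_set hs _ _ _
        have hGn : pvIGet G1 n.1 n.2 = lvl + 1 := pvIGet_set_same hs rfl rfl hinp _
        have hGo : ∀ p : Int × Int, pvInR rows cols p → p ≠ n →
            pvIGet G1 p.1 p.2 = pvIGet G p.1 p.2 := by
          intro p hp hpn
          exact pvIGet_set_ne hs rfl rfl hinp hp (fun h => hpn h.symm) _
        obtain ⟨G', e, heq, hsh, hset, hkeep, hmem, hcnt⟩ := ih G1 (q0 ++ [n]) hs1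
        have hc1iff : ∀ p : Int × Int, pvCndW shaded rows cols G1 ns p ↔
            (pvCndW shaded rows cols G ns p ∧ p ≠ n) := by
          intro p
          constructor
          · rintro ⟨h1, h2, h3, h4⟩
            have hpn : p ≠ n := by
              intro h; rw [h] at h3; rw [hGn] at h3; omega
            exact ⟨⟨h1, h2, by rw [← hGo p h1 hpn]; exact h3, h4⟩, hpn⟩
          · rintro ⟨⟨h1, h2, h3, h4⟩, hpn⟩
            exact ⟨h1, h2, by rw [hGo p h1 hpn]; exact h3, h4⟩
        refine ⟨G', n :: e, ?_, hsh, ?_, ?_, ?_, ?_⟩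
        · rw [e2, heq]; simp
        · rintro p ⟨h1, h2, h3, h4⟩
          by_cases hpn : p = n
          · subst hpn
            have : ¬ pvCndW shaded rows cols G1 ns p := by
              rw [hc1iff]; tauto
            rw [hkeep p h1 this, hGn]
          · rcases List.mem_cons.mp h4 with h | h
            · exact absurd h hpn
            · exact hset p ⟨h1, h2, by rw [hGo p h1 hpn]; exact h3, h⟩
        · intro p hp hnc
          have hpn : p ≠ n := by
            rintro rfl
            exact hnc ⟨hinp, by simpa using hdisc.1, hdisc.2, List.mem_cons_self⟩
          have : ¬ pvCndW shaded rows cols G1 ns p := by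
            rw [hc1iff]
            rintro ⟨⟨h1, h2, h3, h4⟩, _⟩
            exact hnc ⟨h1, h2, h3, List.mem_cons_of_mem _ h4⟩
          rw [hkeep p hp this, hGo p hp hpn]
        · intro p
          simp only [List.mem_cons]
          constructor
          · rintro (rfl | h)
            · exact ⟨hinp, by simpa using hdisc.1, hdisc.2, List.mem_cons_self⟩
            · obtain ⟨⟨h1, h2, h3, h4⟩, hpn⟩ := (hc1iff p).mp ((hmem p).mp h)
              exact ⟨h1, h2, h3, List.mem_cons_of_mem _ h4⟩
          · rintro ⟨h1, h2, h3, h4⟩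
            by_cases hpn : p = n
            · exact Or.inl hpn
            · rcases List.mem_cons.mp h4 with h | h
              · exact absurd h hpn
              · exact Or.inr ((hmem p).mpr ⟨h1, h2, by rw [hGo p h1 hpn]; exact h3, h⟩)
        · have hstep : pvCnt G = pvCnt G1 + 1 :=
            pvCnt_set hs rfl rfl hinp hdisc.2 (by omega)
          rw [hstep, hcnt]; simp; omega
      · -- n is skipped (shaded or already labelled)
        have e2 : pvWrAt shaded rows cols (fun _ => lvl + 1) (G, q0) n = (G, q0) := by
          simp only [pvWrAt, if_pos hin, if_neg hdisc]
        rw [e2]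
        obtain ⟨G', e, heq, hsh, hset, hkeep, hmem, hcnt⟩ := ih G q0 hs
        have hcnd : ∀ p : Int × Int, pvCndW shaded rows cols G (n :: ns) p ↔
            pvCndW shaded rows cols G ns p := by
          intro p
          constructor
          · rintro ⟨h1, h2, h3, h4⟩
            rcases List.mem_cons.mp h4 with rfl | h
            · exact absurd ⟨by simp [h2], h3⟩ hdisc
            · exact ⟨h1, h2, h3, h⟩
          · rintro ⟨h1, h2, h3, h4⟩
            exact ⟨h1, h2, h3, List.mem_cons_of_mem _ h4⟩
        exact ⟨G', e, heq, hsh, fun p hp => hset p ((hcnd p).mp hp),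
          fun p hp hnc => hkeep p hp (fun h => hnc ((hcnd p).mpr h)),
          fun p => (hmem p).trans (hcnd p).symm, hcnt⟩
    · have e2 : pvWrAt shaded rows cols (fun _ => lvl + 1) (G, q0) n = (G, q0) := by
        simp only [pvWrAt, if_neg hin]
      rw [e2]
      obtain ⟨G', e, heq, hsh, hset, hkeep, hmem, hcnt⟩ := ih G q0 hs
      have hcnd : ∀ p : Int × Int, pvCndW shaded rows cols G (n :: ns) p ↔
          pvCndW shaded rows cols G ns p := by
        intro p
        constructor
        · rintro ⟨h1, h2, h3, h4⟩
          rcases List.mem_cons.mp h4 with rfl | h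
          · exact absurd h1 hin
          · exact ⟨h1, h2, h3, h⟩
        · rintro ⟨h1, h2, h3, h4⟩
          exact ⟨h1, h2, h3, List.mem_cons_of_mem _ h4⟩
      exact ⟨G', e, heq, hsh, fun p hp => hset p ((hcnd p).mp hp),
        fun p hp hnc => hkeep p hp (fun h => hnc ((hcnd p).mpr h)),
        fun p => (hmem p).trans (hcnd p).symm, hcnt⟩

-- condition under which the level pass discovers p from frontier F
def pvDisc (shaded : List (List Bool)) (rows cols : Int) (G : List (List Int))
    (F : List (Int × Int)) (p : Int × Int) : Prop :=
  pvInR rows cols p ∧ pvBGet shaded p.1 p.2 = false ∧ pvIGet G p.1 p.2 = -1 ∧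
    ∃ c ∈ F, p ∈ pvNbrs c

lemma pvLevFold (shaded : List (List Bool)) (rows cols lvl : Int) (hl : 0 ≤ lvl) :
    ∀ (F : List (Int × Int)) (G : List (List Int)) (q0 : List (Int × Int)),
      pvShape G rows.toNat cols.toNat →
      ∃ G' e, F.foldl (pvLevStep shaded rows cols lvl) (G, q0) = (G', q0 ++ e) ∧
        pvShape G' rows.toNat cols.toNat ∧
        (∀ p : Int × Int, pvDisc shaded rows cols G F p → pvIGet G' p.1 p.2 = lvl + 1) ∧
        (∀ p : Int × Int, pvInR rows cols p → ¬ pvDisc shaded rows cols G F p →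
          pvIGet G' p.1 p.2 = pvIGet G p.1 p.2) ∧
        (∀ p : Int × Int, p ∈ e ↔ pvDisc shaded rows cols G F p) ∧
        pvCnt G = pvCnt G' + e.length := by
  intro F
  induction F with
  | nil =>
    intro G q0 hs
    refine ⟨G, [], by simp, hs, ?_, fun _ _ _ => rfl, ?_, by simp⟩
    · rintro p ⟨_, _, _, c, hc, _⟩
      simp at hc
    · intro p
      simp [pvDisc]
  | cons c F ih =>
    intro G q0 hs
    simp only [List.foldl_cons]
    rw [pvLevStep_eq]
    obtain ⟨G1, e1, heq1, hs1, hset1, hkeep1, hmem1, hcnt1⟩ :=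
      pvWrFold shaded rows cols lvl hl
        [(c.1 - 1, c.2), (c.1 + 1, c.2), (c.1, c.2 - 1), (c.1, c.2 + 1)] G q0 hs
    rw [heq1]
    obtain ⟨G', e2, heq2, hs2, hset2, hkeep2, hmem2, hcnt2⟩ := ih G1 (q0 ++ e1) hs1
    have hnbr : ∀ p : Int × Int,
        p ∈ [(c.1 - 1, c.2), (c.1 + 1, c.2), (c.1, c.2 - 1), (c.1, c.2 + 1)] ↔ p ∈ pvNbrs c := by
      intro p; rfl
    -- how the head-cell condition and the tail condition combine
    have hsplit : ∀ p : Int × Int, pvDisc shaded rows cols G (c :: F) p ↔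
        (pvCndW shaded rows cols G
            [(c.1 - 1, c.2), (c.1 + 1, c.2), (c.1, c.2 - 1), (c.1, c.2 + 1)] p
          ∨ pvDisc shaded rows cols G F p) := by
      intro p
      constructor
      · rintro ⟨h1, h2, h3, d, hd, hnd⟩
        rcases List.mem_cons.mp hd with rfl | hd'
        · exact Or.inl ⟨h1, h2, h3, (hnbr p).mpr hnd⟩
        · exact Or.inr ⟨h1, h2, h3, d, hd', hnd⟩
      · rintro (⟨h1, h2, h3, h4⟩ | ⟨h1, h2, h3, d, hd, hnd⟩)
        · exact ⟨h1, h2, h3, c, List.mem_cons_self, (hnbr p).mp h4⟩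
        · exact ⟨h1, h2, h3, d, List.mem_cons_of_mem _ hd, hnd⟩
    have htail : ∀ p : Int × Int, pvDisc shaded rows cols G1 F p ↔
        (pvDisc shaded rows cols G F p ∧
          ¬ pvCndW shaded rows cols G
            [(c.1 - 1, c.2), (c.1 + 1, c.2), (c.1, c.2 - 1), (c.1, c.2 + 1)] p) := by
      intro p
      constructor
      · rintro ⟨h1, h2, h3, d, hd, hnd⟩
        have hnc : ¬ pvCndW shaded rows cols G
            [(c.1 - 1, c.2), (c.1 + 1, c.2), (c.1, c.2 - 1), (c.1, c.2 + 1)] p := by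
          intro hc
          rw [hset1 p hc] at h3
          omega
        rw [hkeep1 p h1 hnc] at h3
        exact ⟨⟨h1, h2, h3, d, hd, hnd⟩, hnc⟩
      · rintro ⟨⟨h1, h2, h3, d, hd, hnd⟩, hnc⟩
        rw [← hkeep1 p h1 hnc] at h3
        exact ⟨h1, h2, h3, d, hd, hnd⟩
    refine ⟨G', e1 ++ e2, by rw [heq2, List.append_assoc], hs2, ?_, ?_, ?_, ?_⟩
    · intro p hp
      rcases (hsplit p).mp hp with h | h
      · by_cases ht : pvDisc shaded rows cols G1 F p
        · exact hset2 p ht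
        · rw [hkeep2 p hp.1 ht, hset1 p h]
      · by_cases hc1 : pvCndW shaded rows cols G
            [(c.1 - 1, c.2), (c.1 + 1, c.2), (c.1, c.2 - 1), (c.1, c.2 + 1)] p
        · by_cases ht : pvDisc shaded rows cols G1 F p
          · exact hset2 p ht
          · rw [hkeep2 p hp.1 ht, hset1 p hc1]
        · have ht : pvDisc shaded rows cols G1 F p := (htail p).mpr ⟨h, hc1⟩
          exact hset2 p ht
    · intro p hp hnd
      have h1 : ¬ pvCndW shaded rows cols G
          [(c.1 - 1, c.2), (c.1 + 1, c.2), (c.1, c.2 - 1), (c.1, c.2 + 1)] p :=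
        fun h => hnd ((hsplit p).mpr (Or.inl h))
      have h2 : ¬ pvDisc shaded rows cols G1 F p := by
        rw [htail p]
        rintro ⟨h, _⟩
        exact hnd ((hsplit p).mpr (Or.inr h))
      rw [hkeep2 p hp h2, hkeep1 p hp h1]
    · intro p
      rw [List.mem_append, hmem1 p, hmem2 p, hsplit p, htail p]
      by_cases hc1 : pvCndW shaded rows cols G
          [(c.1 - 1, c.2), (c.1 + 1, c.2), (c.1, c.2 - 1), (c.1, c.2 + 1)] p <;> tauto
    · rw [hcnt1, hcnt2, List.length_append]; omega

lemma pvNbrMinFold (rows cols lvl : Int) (G : List (List Int)) (hl : 0 ≤ lvl) :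
    ∀ (ns : List (Int × Int)),
      (∀ n ∈ ns, pvInR rows cols n → 0 ≤ pvIGet G n.1 n.2 → pvIGet G n.1 n.2 = lvl) →
      ∀ (b : Int), b = -1 ∨ b = lvl →
      ((b = lvl ∨ ∃ n ∈ ns, pvInR rows cols n ∧ 0 ≤ pvIGet G n.1 n.2) →
        ns.foldl (fun best n =>
          if 0 ≤ n.1 ∧ n.1 < rows ∧ 0 ≤ n.2 ∧ n.2 < cols then
            if 0 ≤ pvIGet G n.1 n.2 ∧ (best = -1 ∨ pvIGet G n.1 n.2 < best) then
              pvIGet G n.1 n.2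
            else best
          else best) b = lvl) ∧
      (¬ (b = lvl ∨ ∃ n ∈ ns, pvInR rows cols n ∧ 0 ≤ pvIGet G n.1 n.2) →
        ns.foldl (fun best n =>
          if 0 ≤ n.1 ∧ n.1 < rows ∧ 0 ≤ n.2 ∧ n.2 < cols then
            if 0 ≤ pvIGet G n.1 n.2 ∧ (best = -1 ∨ pvIGet G n.1 n.2 < best) then
              pvIGet G n.1 n.2
            else best
          else best) b = -1) := by
  intro ns
  induction ns with
  | nil =>
    intro _ b hb
    constructor
    · rintro (rfl | ⟨n, hn, _⟩)
      · simp
      · simp at hn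
    · intro hno
      rcases hb with rfl | rfl
      · simp
      · exact absurd (Or.inl rfl) hno
  | cons n ns ih =>
    intro hall b hb
    have hall' : ∀ m ∈ ns, pvInR rows cols m → 0 ≤ pvIGet G m.1 m.2 → pvIGet G m.1 m.2 = lvl :=
      fun m hm => hall m (List.mem_cons_of_mem _ hm)
    simp only [List.foldl_cons]
    by_cases hin : 0 ≤ n.1 ∧ n.1 < rows ∧ 0 ≤ n.2 ∧ n.2 < cols
    · by_cases hnn : 0 ≤ pvIGet G n.1 n.2
      · have hv : pvIGet G n.1 n.2 = lvl := hall n List.mem_cons_self hin hnn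
        have hb' : (if 0 ≤ pvIGet G n.1 n.2 ∧ (b = -1 ∨ pvIGet G n.1 n.2 < b) then
            pvIGet G n.1 n.2 else b) = lvl := by
          rcases hb with rfl | rfl
          · rw [if_pos ⟨hnn, Or.inl rfl⟩, hv]
          · split_ifs with h
            · rw [hv]
            · rfl
        rw [if_pos hin, hb']
        obtain ⟨ihy, _⟩ := ih hall' lvl (Or.inr rfl)
        constructor
        · intro _; exact ihy (Or.inl rfl)
        · intro hno
          exact absurd (Or.inr ⟨n, List.mem_cons_self, hin, hnn⟩) hno
      · have hskip : (if 0 ≤ pvIGet G n.1 n.2 ∧ (b = -1 ∨ pvIGet G n.1 n.2 < b) then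
            pvIGet G n.1 n.2 else b) = b := by
          rw [if_neg (by tauto)]
        rw [if_pos hin, hskip]
        obtain ⟨ihy, ihn⟩ := ih hall' b hb
        constructor
        · rintro (rfl | ⟨m, hm, h1, h2⟩)
          · exact ihy (Or.inl rfl)
          · rcases List.mem_cons.mp hm with rfl | hm'
            · exact absurd h2 hnn
            · exact ihy (Or.inr ⟨m, hm', h1, h2⟩)
        · intro hno
          refine ihn ?_
          rintro (rfl | ⟨m, hm, h1, h2⟩)
          · exact hno (Or.inl rfl)
          · exact hno (Or.inr ⟨m, List.mem_cons_of_mem _ hm, h1, h2⟩)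
    · rw [if_neg hin]
      obtain ⟨ihy, ihn⟩ := ih hall' b hb
      constructor
      · rintro (rfl | ⟨m, hm, h1, h2⟩)
        · exact ihy (Or.inl rfl)
        · rcases List.mem_cons.mp hm with rfl | hm'
          · exact absurd h1 hin
          · exact ihy (Or.inr ⟨m, hm', h1, h2⟩)
      · intro hno
        refine ihn ?_
        rintro (rfl | ⟨m, hm, h1, h2⟩)
        · exact hno (Or.inl rfl)
        · exact hno (Or.inr ⟨m, List.mem_cons_of_mem _ hm, h1, h2⟩)

lemma pvGridEq (rows cols : Int) (G H : List (List Int))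
    (hG : pvShape G rows.toNat cols.toNat) (hH : pvShape H rows.toNat cols.toNat)
    (h : ∀ p : Int × Int, pvInR rows cols p → pvIGet G p.1 p.2 = pvIGet H p.1 p.2) :
    G = H := by
  have hRG := hG.1
  have hRH := hH.1
  apply List.ext_getElem (by omega)
  intro j hj1 hj2
  have hCg : (G[j]'hj1).length = cols.toNat := pvShape_rowlen hG hj1
  have hCh : (H[j]'hj2).length = cols.toNat := pvShape_rowlen hH hj2
  apply List.ext_getElem (by omega)
  intro i hi1 hi2
  have hp : pvInR rows cols ((j : Int), (i : Int)) := by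
    refine ⟨by positivity, by omega, by positivity, by omega⟩
  have e1 := pvIGet_eq G (j : Int) (i : Int) (by positivity)
    (by simpa using hj1) (by positivity) (by simpa using hi1)
  have e2 := pvIGet_eq H (j : Int) (i : Int) (by positivity)
    (by simpa using hj2) (by positivity) (by simpa using hi2)
  have := h ((j : Int), (i : Int)) hp
  simp only [e1, e2] at this
  simpa using this

-- Jacobi pass, characterized
def pvJVal (shaded : List (List Bool)) (rows cols : Int) (G : List (List Int)) (r c : Int) : Int :=
  if pvIGet G r c = -1 ∧ ¬ pvBGet shaded r c then
    if pvNbrMin rows cols G r c ≠ -1 then pvNbrMin rows cols G r c + 1 else pvIGet G r c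
  else pvIGet G r c

def pvJCnd (shaded : List (List Bool)) (rows cols : Int) (G : List (List Int)) (r c : Int) : Bool :=
  decide (pvIGet G r c = -1 ∧ ¬ pvBGet shaded r c ∧ pvNbrMin rows cols G r c ≠ -1)

lemma pvFoldAppFlag {α β : Type} (f : α → β) (g : α → Bool) :
    ∀ (l : List α) (acc : List β) (b : Bool),
      l.foldl (fun t x => (t.1 ++ [f x], t.2 || g x)) (acc, b) = (acc ++ l.map f, b || l.any g) := by
  intro l
  induction l with
  | nil => intro acc b; simp
  | cons x l ih =>
    intro acc b
    simp only [List.foldl_cons, List.map_cons, List.any_cons]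
    rw [ih]
    simp [Bool.or_assoc]

lemma pvJacPass_eq (shaded : List (List Bool)) (rows cols : Int) (G : List (List Int)) :
    pvJacPass shaded rows cols G =
      ((PySem.List.pyRange 0 rows 1).map (fun r =>
         (PySem.List.pyRange 0 cols 1).map (fun c => pvJVal shaded rows cols G r c)),
       (PySem.List.pyRange 0 rows 1).any (fun r =>
         (PySem.List.pyRange 0 cols 1).any (fun c => pvJCnd shaded rows cols G r c))) := by
  unfold pvJacPass
  have hbody : ∀ r : Int,
      (fun (t : List Int × Bool) (c : Int) =>
        if pvIGet G r c = -1 ∧ ¬ pvBGet shaded r c then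
          if pvNbrMin rows cols G r c ≠ -1 then
            (t.1 ++ [pvNbrMin rows cols G r c + 1], true)
          else (t.1 ++ [pvIGet G r c], t.2)
        else (t.1 ++ [pvIGet G r c], t.2))
      = fun t c => (t.1 ++ [pvJVal shaded rows cols G r c],
          t.2 || pvJCnd shaded rows cols G r c) := by
    intro r; funext t c
    simp only [pvJVal, pvJCnd]
    split_ifs with h1 h2
    · obtain ⟨ha, hb⟩ := h1
      simp [ha, hb, h2]
    · obtain ⟨ha, hb⟩ := h1
      simp [ha, hb, h2]
    · have hno : ¬ (pvIGet G r c = -1 ∧ ¬ pvBGet shaded r c ∧ pvNbrMin rows cols G r c ≠ -1) :=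
        fun ⟨x, y, _⟩ => h1 ⟨x, y⟩
      simp only [hno, decide_false, Bool.or_false]
  simp only [hbody, pvFoldAppFlag, List.nil_append]
  simp

-- the invariant tying the level-BFS state to the grid alone
def pvInv (shaded : List (List Bool)) (rows cols : Int) (G : List (List Int))
    (F : List (Int × Int)) (lvl : Int) : Prop :=
  0 ≤ lvl ∧ pvShape G rows.toNat cols.toNat ∧
  (∀ p : Int × Int, pvInR rows cols p → -1 ≤ pvIGet G p.1 p.2 ∧ pvIGet G p.1 p.2 ≤ lvl) ∧
  (∀ p : Int × Int, pvInR rows cols p → pvIGet G p.1 p.2 ≠ -1 → pvBGet shaded p.1 p.2 = false) ∧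
  (∀ p : Int × Int, p ∈ F ↔ pvInR rows cols p ∧ pvIGet G p.1 p.2 = lvl) ∧
  (∀ p : Int × Int, pvInR rows cols p → 0 ≤ pvIGet G p.1 p.2 → pvIGet G p.1 p.2 < lvl →
     ∀ q ∈ pvNbrs p, pvInR rows cols q → pvBGet shaded q.1 q.2 = false →
       pvIGet G q.1 q.2 ≠ -1)

lemma pvNbrChar (shaded : List (List Bool)) (rows cols : Int) (G : List (List Int))
    (F : List (Int × Int)) (lvl : Int) (hInv : pvInv shaded rows cols G F lvl)
    (p : Int × Int) (hp : pvInR rows cols p) (hm1 : pvIGet G p.1 p.2 = -1)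
    (hop : pvBGet shaded p.1 p.2 = false) :
    ((∃ c ∈ F, p ∈ pvNbrs c) → pvNbrMin rows cols G p.1 p.2 = lvl) ∧
    (¬ (∃ c ∈ F, p ∈ pvNbrs c) → pvNbrMin rows cols G p.1 p.2 = -1) := by
  obtain ⟨hl, hs, hv1, hv2, hf, hlip⟩ := hInv
  have hall : ∀ n ∈ pvNbrs p, pvInR rows cols n → 0 ≤ pvIGet G n.1 n.2 →
      pvIGet G n.1 n.2 = lvl := by
    intro n hn hinn hge
    by_contra hne
    have hlt : pvIGet G n.1 n.2 < lvl := lt_of_le_of_ne (hv1 n hinn).2 hne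
    exact hlip n hinn hge hlt p ((pvNbrs_symm p n).mpr hn) hp hop hm1
  have hiff : (∃ n ∈ pvNbrs p, pvInR rows cols n ∧ 0 ≤ pvIGet G n.1 n.2)
      ↔ (∃ c ∈ F, p ∈ pvNbrs c) := by
    constructor
    · rintro ⟨n, hn, hinn, hge⟩
      exact ⟨n, (hf n).mpr ⟨hinn, hall n hn hinn hge⟩, (pvNbrs_symm p n).mpr hn⟩
    · rintro ⟨c, hc, hnc⟩
      obtain ⟨hinc, hvc⟩ := (hf c).mp hc
      exact ⟨c, (pvNbrs_symm p c).mp hnc, hinc, by omega⟩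
  obtain ⟨hy, hn⟩ := pvNbrMinFold rows cols lvl G hl (pvNbrs p) hall (-1) (Or.inl rfl)
  constructor
  · intro hex
    exact hy (Or.inr (hiff.mpr hex))
  · intro hno
    apply hn
    rintro (h | hexn)
    · omega
    · exact hno (hiff.mp hexn)

lemma pvPassBridge (shaded : List (List Bool)) (rows cols : Int) (G : List (List Int))
    (F : List (Int × Int)) (lvl : Int) (hInv : pvInv shaded rows cols G F lvl) :
    ∃ G' e, F.foldl (pvLevStep shaded rows cols lvl) (G, []) = (G', e) ∧
      pvJacPass shaded rows cols G = (G', !e.isEmpty) ∧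
      pvInv shaded rows cols G' e (lvl + 1) ∧
      pvCnt G = pvCnt G' + e.length := by
  obtain ⟨hl, hs, hv1, hv2, hf, hlip⟩ := hInv
  obtain ⟨G', e, heq, hs', hset, hkeep, hmem, hcnt⟩ := pvLevFold shaded rows cols lvl hl F G [] hs
  rw [List.nil_append] at heq
  have hmono : ∀ p : Int × Int, pvInR rows cols p → pvIGet G p.1 p.2 ≠ -1 →
      pvIGet G' p.1 p.2 = pvIGet G p.1 p.2 := by
    intro p hp hne
    exact hkeep p hp (fun h => hne h.2.2.1)
  -- pointwise value of the Jacobi pass equals the level pass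
  have hpoint : ∀ p : Int × Int, pvInR rows cols p →
      pvJVal shaded rows cols G p.1 p.2 = pvIGet G' p.1 p.2 := by
    intro p hp
    by_cases hb : pvIGet G p.1 p.2 = -1 ∧ pvBGet shaded p.1 p.2 = false
    · obtain ⟨hc1, hc2⟩ := pvNbrChar shaded rows cols G F lvl
        ⟨hl, hs, hv1, hv2, hf, hlip⟩ p hp hb.1 hb.2
      by_cases hex : ∃ c ∈ F, p ∈ pvNbrs c
      · have hD : pvDisc shaded rows cols G F p := ⟨hp, hb.2, hb.1, hex⟩
        rw [hset p hD]
        simp only [pvJVal, hc1 hex]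
        rw [if_pos ⟨hb.1, by simp [hb.2]⟩, if_pos (by omega)]
      · have hD : ¬ pvDisc shaded rows cols G F p := fun h => hex h.2.2.2
        rw [hkeep p hp hD]
        simp only [pvJVal, hc2 hex]
        rw [if_pos ⟨hb.1, by simp [hb.2]⟩, if_neg (by omega)]
    · have hD : ¬ pvDisc shaded rows cols G F p := fun h => hb ⟨h.2.2.1, h.2.1⟩
      rw [hkeep p hp hD]
      simp only [pvJVal]
      rw [if_neg (by
        rintro ⟨x, y⟩
        exact hb ⟨x, by simpa using y⟩)]
  have hgrid : (PySem.List.pyRange 0 rows 1).map (fun r =>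
      (PySem.List.pyRange 0 cols 1).map (fun c => pvJVal shaded rows cols G r c)) = G' := by
    apply pvGridEq rows cols _ _ (pvShape_mapGrid rows cols _) hs'
    intro p hp
    rw [pvIGet_mapGrid rows cols _ hp]
    exact hpoint p hp
  have hch : ((PySem.List.pyRange 0 rows 1).any (fun r =>
      (PySem.List.pyRange 0 cols 1).any (fun c => pvJCnd shaded rows cols G r c))) = !e.isEmpty := by
    have hexiff : (∃ p : Int × Int, pvDisc shaded rows cols G F p) ↔ e ≠ [] := by
      constructor
      · rintro ⟨p, hp⟩
        intro hnil
        have hin := (hmem p).mpr hp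
        rw [hnil] at hin
        simp at hin
      · intro hne
        cases e with
        | nil => exact absurd rfl hne
        | cons x e' => exact ⟨x, (hmem x).mp List.mem_cons_self⟩
    by_cases hex : ∃ p : Int × Int, pvDisc shaded rows cols G F p
    · obtain ⟨p, hp⟩ := hex
      obtain ⟨hp1, hp2, hp3, hp4⟩ := hp
      have hc1 := (pvNbrChar shaded rows cols G F lvl
        ⟨hl, hs, hv1, hv2, hf, hlip⟩ p hp1 hp3 hp2).1 hp4
      have : ((PySem.List.pyRange 0 rows 1).any (fun r =>
          (PySem.List.pyRange 0 cols 1).any (fun c => pvJCnd shaded rows cols G r c))) = true := by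
        rw [List.any_eq_true]
        refine ⟨p.1, by rw [PySem.List.mem_pyRange_one]; exact ⟨hp1.1, hp1.2.1⟩, ?_⟩
        rw [List.any_eq_true]
        refine ⟨p.2, by rw [PySem.List.mem_pyRange_one]; exact ⟨hp1.2.2.1, hp1.2.2.2⟩, ?_⟩
        simp only [pvJCnd, decide_eq_true_iff]
        exact ⟨hp3, by simp [hp2], by rw [hc1]; omega⟩
      rw [this]
      have := hexiff.mp ⟨p, hp1, hp2, hp3, hp4⟩
      cases e with
      | nil => exact absurd rfl this
      | cons _ _ => simp
    · have hnone : ((PySem.List.pyRange 0 rows 1).any (fun r =>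
          (PySem.List.pyRange 0 cols 1).any (fun c => pvJCnd shaded rows cols G r c))) = false := by
        rw [List.any_eq_false]
        intro r hr
        rw [Bool.not_eq_true, List.any_eq_false]
        intro c hc
        rw [PySem.List.mem_pyRange_one] at hr hc
        simp only [pvJCnd, decide_eq_true_eq]
        rintro ⟨h1, h2, h3⟩
        have hp : pvInR rows cols (r, c) := ⟨hr.1, hr.2, hc.1, hc.2⟩
        have hc2 := (pvNbrChar shaded rows cols G F lvl
          ⟨hl, hs, hv1, hv2, hf, hlip⟩ (r, c) hp h1 (by simpa using h2)).2
        by_cases hex2 : ∃ d ∈ F, (r, c) ∈ pvNbrs d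
        · exact hex ⟨(r, c), hp, by simpa using h2, h1, hex2⟩
        · exact h3 (hc2 hex2)
      rw [hnone]
      have : e = [] := by
        cases e with
        | nil => rfl
        | cons x e' => exact absurd ⟨x, (hmem x).mp List.mem_cons_self⟩ hex
      rw [this]
      rfl
  refine ⟨G', e, heq, ?_, ?_, hcnt⟩
  · rw [pvJacPass_eq, hgrid, hch]
  · -- the invariant advances to the next level
    refine ⟨by omega, hs', ?_, ?_, ?_, ?_⟩
    · intro p hp
      by_cases hD : pvDisc shaded rows cols G F p
      · rw [hset p hD]; omega
      · rw [hkeep p hp hD]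
        have := hv1 p hp
        omega
    · intro p hp hne
      by_cases hD : pvDisc shaded rows cols G F p
      · exact hD.2.1
      · rw [hkeep p hp hD] at hne
        exact hv2 p hp hne
    · intro p
      rw [hmem p]
      constructor
      · intro hD
        exact ⟨hD.1, hset p hD⟩
      · rintro ⟨hp, hval⟩
        by_contra hD
        rw [hkeep p hp hD] at hval
        have := hv1 p hp
        omega
    · intro p hp hge hlt q hq hinq hopq
      by_cases hDq : pvDisc shaded rows cols G F q
      · rw [hset q hDq]; omega
      · rw [hkeep q hinq hDq]
        by_cases hDp : pvDisc shaded rows cols G F p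
        · rw [hset p hDp] at hlt; omega
        · rw [hkeep p hp hDp] at hge hlt
          by_cases hplvl : pvIGet G p.1 p.2 = lvl
          · -- p is in the frontier: q would have been discovered if unlabelled
            intro hqm1
            exact hDq ⟨hinq, hopq, hqm1, p, (hf p).mpr ⟨hp, hplvl⟩, hq⟩
          · have hlt' : pvIGet G p.1 p.2 < lvl := lt_of_le_of_ne (by omega) hplvl
            exact hlip p hp hge hlt' q hq hinq hopq
  
lemma pvLevLoop_nil (shaded : List (List Bool)) (rows cols : Int) (f : Nat)
    (G : List (List Int)) (lvl : Int) :
    pvLevLoop shaded rows cols f G [] lvl = G := by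
  cases f <;> rfl

lemma pvJacLoop_succ (shaded : List (List Bool)) (rows cols : Int) (f : Nat)
    (G : List (List Int)) :
    pvJacLoop shaded rows cols (f + 1) G =
      (if (pvJacPass shaded rows cols G).2 = true
       then pvJacLoop shaded rows cols f (pvJacPass shaded rows cols G).1
       else (pvJacPass shaded rows cols G).1) := rfl

lemma pvLevJac (shaded : List (List Bool)) (rows cols : Int) :
    ∀ (N : Nat) (G : List (List Int)) (F : List (Int × Int)) (lvl : Int) (fA fB : Nat),
      pvInv shaded rows cols G F lvl → pvCnt G ≤ N → N < fA → N < fB →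
      pvLevLoop shaded rows cols fA G F lvl = pvJacLoop shaded rows cols fB G := by
  intro N
  induction N with
  | zero =>
    intro G F lvl fA fB hInv hcnt hfA hfB
    obtain ⟨G', e, heq, hpass, hInv', hc⟩ := pvPassBridge shaded rows cols G F lvl hInv
    cases fB with
    | zero => omega
    | succ fB =>
    cases fA with
    | zero => omega
    | succ fA =>
    rw [pvJacLoop_succ, hpass]
    cases F with
    | nil =>
      rw [List.foldl_nil] at heq
      have hG : G' = G := (Prod.ext_iff.mp heq).1.symm
      have he : e = [] := (Prod.ext_iff.mp heq).2.symm
      subst hG; subst he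
      rw [pvLevLoop_nil]
      rfl
    | cons c F' =>
      rw [pvLevLoop_cons]
      simp only [heq]
      cases e with
      | nil =>
        rw [pvLevLoop_nil]
        rfl
      | cons x e' =>
        exfalso
        simp at hc
        omega
  | succ N ih =>
    intro G F lvl fA fB hInv hcnt hfA hfB
    obtain ⟨G', e, heq, hpass, hInv', hc⟩ := pvPassBridge shaded rows cols G F lvl hInv
    cases fB with
    | zero => omega
    | succ fB =>
    cases fA with
    | zero => omega
    | succ fA =>
    rw [pvJacLoop_succ, hpass]
    cases F with
    | nil =>
      rw [List.foldl_nil] at heq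
      have hG : G' = G := (Prod.ext_iff.mp heq).1.symm
      have he : e = [] := (Prod.ext_iff.mp heq).2.symm
      subst hG; subst he
      rw [pvLevLoop_nil]
      rfl
    | cons c F' =>
      rw [pvLevLoop_cons]
      simp only [heq]
      cases e with
      | nil =>
        rw [pvLevLoop_nil]
        rfl
      | cons x e' =>
        simp only [List.isEmpty_cons, Bool.not_false, if_pos rfl]
        exact ih G' (x :: e') (lvl + 1) fA fB hInv' (by simp at hc ⊢; omega) (by omega) (by omega)

lemma pvInv0 (shaded : List (List Bool)) (rows cols : Int) :
    pvInv shaded rows cols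
      ((PySem.List.pyRange 0 rows 1).map (fun r =>
        (PySem.List.pyRange 0 cols 1).map
          (fun c => if pvOpenBorder shaded rows cols r c then (0 : Int) else -1)))
      ((PySem.List.pyRange 0 rows 1).flatMap (fun r =>
        ((PySem.List.pyRange 0 cols 1).filter (fun c => pvOpenBorder shaded rows cols r c)).map
          (fun c => (r, c))))
      0 := by
  refine ⟨le_refl 0, pvShape_mapGrid rows cols _, ?_, ?_, ?_, ?_⟩
  · intro p hp
    rw [pvIGet_mapGrid rows cols _ hp]
    split_ifs <;> omega
  · intro p hp hne
    rw [pvIGet_mapGrid rows cols _ hp] at hne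
    by_cases hob : pvOpenBorder shaded rows cols p.1 p.2 = true
    · simp only [pvOpenBorder, Bool.and_eq_true, Bool.not_eq_true'] at hob
      exact hob.1
    · rw [if_neg (by simpa using hob)] at hne
      omega
  · intro p
    constructor
    · intro hp
      obtain ⟨hin, hob⟩ := pvFrontMem shaded rows cols hp
      refine ⟨hin, ?_⟩
      rw [pvIGet_mapGrid rows cols _ hin, if_pos hob]
    · rintro ⟨hin, hval⟩
      rw [pvIGet_mapGrid rows cols _ hin] at hval
      by_cases hob : pvOpenBorder shaded rows cols p.1 p.2 = true
      · exact pvFrontMem_rev shaded rows cols hin hob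
      · rw [if_neg (by simpa using hob)] at hval
        omega
  · intro p hp hge hlt
    rw [pvIGet_mapGrid rows cols _ hp] at hge hlt
    split_ifs at hge hlt <;> omega

-- ===== VERDICT (by name: the statement is the Claim_ definition above) =====
theorem compute_bfs_depth_py_spec : Claim_equal_compute_bfs_depth_py := by
  intro shaded rows cols _ _
  unfold Spec_compute_bfs_depth_py
  show compute_bfs_depth_py shaded rows cols = compute_bfs_depth_py_alt shaded rows cols
  simp only [compute_bfs_depth_py, compute_bfs_depth_py_alt, pvInitEq]
  have hsh := pvShape_mapGrid rows cols
    (fun r c => if pvOpenBorder shaded rows cols r c then (0 : Int) else -1)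
  have hcnt := pvCnt_le hsh
  have hflen := pvFrontLen shaded rows cols
  have hassoc : 3 * rows.toNat * cols.toNat = 3 * (rows.toNat * cols.toNat) := by ring
  have hA : pvLoopA shaded rows cols (3 * rows.toNat * cols.toNat + 3)
      ((PySem.List.pyRange 0 rows 1).map (fun r =>
        (PySem.List.pyRange 0 cols 1).map
          (fun c => if pvOpenBorder shaded rows cols r c then (0 : Int) else -1)))
      ((PySem.List.pyRange 0 rows 1).flatMap (fun r =>
        ((PySem.List.pyRange 0 cols 1).filter (fun c => pvOpenBorder shaded rows cols r c)).map
          (fun c => (r, c))))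
    = pvLevLoop shaded rows cols (3 * rows.toNat * cols.toNat + 4)
      ((PySem.List.pyRange 0 rows 1).map (fun r =>
        (PySem.List.pyRange 0 cols 1).map
          (fun c => if pvOpenBorder shaded rows cols r c then (0 : Int) else -1)))
      ((PySem.List.pyRange 0 rows 1).flatMap (fun r =>
        ((PySem.List.pyRange 0 cols 1).filter (fun c => pvOpenBorder shaded rows cols r c)).map
          (fun c => (r, c)))) 0 := by
    cases hfr : (PySem.List.pyRange 0 rows 1).flatMap (fun r =>
        ((PySem.List.pyRange 0 cols 1).filter (fun c => pvOpenBorder shaded rows cols r c)).map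
          (fun c => (r, c))) with
    | nil =>
      rw [pvLevLoop_nil]
      have hfuel : 3 * rows.toNat * cols.toNat + 3 = (3 * rows.toNat * cols.toNat + 2) + 1 := rfl
      rw [hfuel]
      rfl
    | cons c fr =>
      have hfuelB : 3 * rows.toNat * cols.toNat + 4 = (3 * rows.toNat * cols.toNat + 3) + 1 := rfl
      rw [hfuelB, pvLevLoop_cons]
      have hmem : ∀ p ∈ c :: fr, pvInR rows cols p ∧
          pvIGet ((PySem.List.pyRange 0 rows 1).map (fun r =>
            (PySem.List.pyRange 0 cols 1).map
              (fun c => if pvOpenBorder shaded rows cols r c then (0 : Int) else -1))) p.1 p.2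
            = 0 := by
        intro p hp
        rw [← hfr] at hp
        obtain ⟨hin, hob⟩ := pvFrontMem shaded rows cols hp
        refine ⟨hin, ?_⟩
        rw [pvIGet_mapGrid rows cols _ hin, hob]
        simp
      have hlen : (c :: fr).length ≤ rows.toNat * cols.toNat := by rw [← hfr]; exact hflen
      have hsim := pvSim shaded rows cols (3 * rows.toNat * cols.toNat + 2)
        ((PySem.List.pyRange 0 rows 1).map (fun r =>
          (PySem.List.pyRange 0 cols 1).map
            (fun c => if pvOpenBorder shaded rows cols r c then (0 : Int) else -1)))
        (c :: fr) [] 0 (3 * rows.toNat * cols.toNat + 3) (3 * rows.toNat * cols.toNat + 3)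
        (by simp only [List.append_nil]; omega)
        hsh le_rfl hmem (by simp) (by omega) (by omega)
      rw [List.append_nil] at hsim
      rw [hsim]
  rw [hA]
  have hInv0 := pvInv0 shaded rows cols
  exact pvLevJac shaded rows cols (rows.toNat * cols.toNat + 1) _ _ 0
    (3 * rows.toNat * cols.toNat + 4) (rows.toNat * cols.toNat + 2)
    hInv0 (by omega) (by omega) (by omega)
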